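-- pv_equiv track=rewrite | github.com/wllife2017/browser-use | tests/heavy_pages/test_heavy_dom.py | gen_page_deep_nesting
-- ===== SOURCE A (Python) =====
-- def gen_page_deep_nesting(depth: int, breadth: int) -> str:
--     """Page 5: Deeply nested DOM tree."""
--     def make_tree(d: int, b: int) -> str:
--         if d <= 0:
--             return f'<span class="leaf">Leaf d={d}</span>'
--         children = ''.join(
--             f'<div class="level-{d}" data-depth="{d}" data-branch="{i}">'
--             f'<span>L{d}B{i}</span>{make_tree(d - 1, b)}</div>'
--             for i in range(b)
--         )
--         return children
--
--     # Limit recursion to avoid explosion — depth=8, breadth=3 gives ~6k nodes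
--     tree = make_tree(min(depth, 10), min(breadth, 3))
--     return f'<html><head><title>Deep Nesting (d={depth}, b={breadth})</title></head><body><h1>Deep nesting</h1><div id="root">{tree}</div></body></html>'
-- ===== SOURCE B (Python) =====
-- def gen_page_deep_nesting(depth: int, breadth: int) -> str:
--     """Page 5: Deeply nested DOM tree (flat token list built level by level, joined once)."""
--     d0 = min(depth, 10)
--     b = min(breadth, 3)
--     if d0 <= 0:
--         parts = [f'<span class="leaf">Leaf d={d0}</span>']
--     else:
--         parts = ['<span class="leaf">Leaf d=0</span>']
--         for d in range(1, d0 + 1):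
--             wrapped = []
--             for i in range(b):
--                 wrapped.append(
--                     f'<div class="level-{d}" data-depth="{d}" data-branch="{i}"><span>L{d}B{i}</span>'
--                 )
--                 wrapped.extend(parts)
--                 wrapped.append('</div>')
--             parts = wrapped
--     pieces = [
--         f'<html><head><title>Deep Nesting (d={depth}, b={breadth})</title></head>'
--         f'<body><h1>Deep nesting</h1><div id="root">'
--     ]
--     pieces.extend(parts)
--     pieces.append('</div></body></html>')
--     return ''.join(pieces)
-- ===== Notes on version B (the rewrite author's own statement) =====
-- stated objective: faster
-- what changed: B replaces A's top-down recursion (which rebuilds the identical subtree string once per branch) by a bottom-up loop over a flat token list: each level's small tag tokens are built once, the previous level's tokens are spliced in b times, and the whole page is joined in a single pass.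
import Mathlib
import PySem

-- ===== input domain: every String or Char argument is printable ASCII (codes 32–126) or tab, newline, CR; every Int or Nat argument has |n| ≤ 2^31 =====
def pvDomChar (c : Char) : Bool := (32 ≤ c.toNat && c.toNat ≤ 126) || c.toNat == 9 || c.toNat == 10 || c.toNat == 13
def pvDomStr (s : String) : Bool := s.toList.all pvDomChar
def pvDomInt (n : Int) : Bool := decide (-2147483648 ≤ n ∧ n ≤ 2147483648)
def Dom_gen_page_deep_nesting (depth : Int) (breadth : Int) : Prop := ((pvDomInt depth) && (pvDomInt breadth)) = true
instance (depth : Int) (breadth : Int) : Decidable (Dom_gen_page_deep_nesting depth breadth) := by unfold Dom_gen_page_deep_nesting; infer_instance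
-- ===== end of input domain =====

-- B builds a flat token LIST level by level (each level's tokens constructed once and spliced
-- b times) and joins it once at the end, instead of A's top-down recursion that rebuilds the
-- identical subtree string for every branch (objective: faster, constant-factor).

-- ===== PORT A =====
-- A's inner recursive make_tree(d, b)
def pvMakeTree (d : Int) (b : Int) : String :=
  if d ≤ 0 then
    "<span class=\"leaf\">Leaf d=" ++ PySem.Int.toStr d ++ "</span>"
  else
    PySem.Str.join "" ((PySem.List.pyRange 0 b 1).map (fun i =>
      "<div class=\"level-" ++ PySem.Int.toStr d ++ "\" data-depth=\"" ++ PySem.Int.toStr d ++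
      "\" data-branch=\"" ++ PySem.Int.toStr i ++ "\"><span>L" ++ PySem.Int.toStr d ++ "B" ++
      PySem.Int.toStr i ++ "</span>" ++ pvMakeTree (d - 1) b ++ "</div>"))
termination_by d.toNat
decreasing_by omega

def gen_page_deep_nesting (depth : Int) (breadth : Int) : String :=
  let tree := pvMakeTree (min depth 10) (min breadth 3)
  "<html><head><title>Deep Nesting (d=" ++ PySem.Int.toStr depth ++ ", b=" ++ PySem.Int.toStr breadth ++
  ")</title></head><body><h1>Deep nesting</h1><div id=\"root\">" ++ tree ++ "</div></body></html>"

-- ===== PORT B =====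
-- the opening-tag token B appends for branch i at level d
def pvOpenTok (d : Int) (i : Int) : String :=
  "<div class=\"level-" ++ PySem.Int.toStr d ++ "\" data-depth=\"" ++ PySem.Int.toStr d ++
  "\" data-branch=\"" ++ PySem.Int.toStr i ++ "\"><span>L" ++ PySem.Int.toStr d ++ "B" ++
  PySem.Int.toStr i ++ "</span>"

def gen_page_deep_nesting_alt (depth : Int) (breadth : Int) : String :=
  let d0 := min depth 10
  let b := min breadth 3
  let parts : List String :=
    if d0 ≤ 0 then
      ["<span class=\"leaf\">Leaf d=" ++ PySem.Int.toStr d0 ++ "</span>"]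
    else
      (PySem.List.pyRange 1 (d0 + 1) 1).foldl
        (fun parts d =>
          (PySem.List.pyRange 0 b 1).foldl
            (fun w i => ((w ++ [pvOpenTok d i]) ++ parts) ++ ["</div>"]) [])
        ["<span class=\"leaf\">Leaf d=0</span>"]
  PySem.Str.join ""
    (("<html><head><title>Deep Nesting (d=" ++ PySem.Int.toStr depth ++ ", b=" ++ PySem.Int.toStr breadth ++
      ")</title></head><body><h1>Deep nesting</h1><div id=\"root\">") :: (parts ++ ["</div></body></html>"]))

-- ===== PRECONDITION & SPEC =====
def Spec_gen_page_deep_nesting (depth : Int) (breadth : Int) (out : String) : Prop := out = gen_page_deep_nesting_alt depth breadth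
instance (depth : Int) (breadth : Int) (out : String) : Decidable (Spec_gen_page_deep_nesting depth breadth out) := by unfold Spec_gen_page_deep_nesting; infer_instance

-- ===== CLAIM (what is proved, stated in full; the proofs are below) =====
def Claim_equal_gen_page_deep_nesting : Prop := ∀ (depth : Int) (breadth : Int), Dom_gen_page_deep_nesting depth breadth → Spec_gen_page_deep_nesting depth breadth (gen_page_deep_nesting depth breadth)

-- ===== LEMMAS AND PROOFS =====

theorem pvchars_join_nil_flatten (zs : List (List Char)) :
    PySem.Chars.join [] zs = zs.flatten := by
  induction zs with
  | nil => simp [PySem.Chars.join_nil]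
  | cons p rest ih =>
    cases rest with
    | nil => rw [PySem.Chars.join_singleton]; simp
    | cons q rest' =>
      rw [PySem.Chars.join_cons_cons]
      simp [ih]

theorem pvJoinE_nil : PySem.Str.join "" ([] : List String) = "" := by
  apply String.toList_injective
  simp

theorem pvJoinE_cons (s : String) (l : List String) :
    PySem.Str.join "" (s :: l) = s ++ PySem.Str.join "" l := by
  apply String.toList_injective
  simp [pvchars_join_nil_flatten]

theorem pvJoinE_append (xs ys : List String) :
    PySem.Str.join "" (xs ++ ys) = PySem.Str.join "" xs ++ PySem.Str.join "" ys := by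
  apply String.toList_injective
  simp [pvchars_join_nil_flatten]

theorem pvJoinE_singleton (s : String) : PySem.Str.join "" [s] = s := by
  rw [pvJoinE_cons, pvJoinE_nil]
  simp

-- A's level-building step (named only for the proofs; both ports write their code inline)
def pvStep (b : Int) (sub : String) (d : Int) : String :=
  PySem.Str.join "" ((PySem.List.pyRange 0 b 1).map (fun i =>
    "<div class=\"level-" ++ PySem.Int.toStr d ++ "\" data-depth=\"" ++ PySem.Int.toStr d ++
    "\" data-branch=\"" ++ PySem.Int.toStr i ++ "\"><span>L" ++ PySem.Int.toStr d ++ "B" ++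
    PySem.Int.toStr i ++ "</span>" ++ sub ++ "</div>"))

theorem pvMakeTree_zero (b : Int) : pvMakeTree 0 b = "<span class=\"leaf\">Leaf d=0</span>" := by
  rw [pvMakeTree, if_pos (le_refl (0 : Int))]
  decide

theorem pvMakeTree_pos (d b : Int) (hd : ¬ d ≤ 0) :
    pvMakeTree d b = pvStep b (pvMakeTree (d - 1) b) d := by
  rw [pvMakeTree, if_neg hd]
  rfl

-- the inner branch loop: joining B's token accumulator gives A's concatenation
theorem pvInner (d : Int) (parts : List String) (l : List Int) (w0 : List String) :
    PySem.Str.join "" (l.foldl (fun w i => ((w ++ [pvOpenTok d i]) ++ parts) ++ ["</div>"]) w0)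
      = PySem.Str.join "" w0 ++
        PySem.Str.join "" (l.map (fun i => pvOpenTok d i ++ PySem.Str.join "" parts ++ "</div>")) := by
  induction l generalizing w0 with
  | nil => simp [pvJoinE_nil]
  | cons i t ih =>
    simp only [List.foldl_cons, List.map_cons]
    rw [ih, pvJoinE_cons]
    rw [pvJoinE_append, pvJoinE_append, pvJoinE_append, pvJoinE_singleton, pvJoinE_singleton]
    simp [String.append_assoc]

-- joining B's tokens for ONE level equals A's level string
theorem pvLevel (b d : Int) (parts : List String) :
    PySem.Str.join "" ((PySem.List.pyRange 0 b 1).foldl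
        (fun w i => ((w ++ [pvOpenTok d i]) ++ parts) ++ ["</div>"]) [])
      = pvStep b (PySem.Str.join "" parts) d := by
  rw [pvInner, pvJoinE_nil]
  have : (fun i => pvOpenTok d i ++ PySem.Str.join "" parts ++ "</div>")
      = (fun i =>
        "<div class=\"level-" ++ PySem.Int.toStr d ++ "\" data-depth=\"" ++ PySem.Int.toStr d ++
        "\" data-branch=\"" ++ PySem.Int.toStr i ++ "\"><span>L" ++ PySem.Int.toStr d ++ "B" ++
        PySem.Int.toStr i ++ "</span>" ++ PySem.Str.join "" parts ++ "</div>") := by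
    funext i
    simp [pvOpenTok, String.append_assoc]
  rw [pvStep, this]
  simp

-- B's outer loop joined = A's recursion
theorem pvOuter (b : Int) (n : Nat) :
    PySem.Str.join "" ((PySem.List.pyRange 1 ((n : Int) + 1) 1).foldl
        (fun parts d =>
          (PySem.List.pyRange 0 b 1).foldl
            (fun w i => ((w ++ [pvOpenTok d i]) ++ parts) ++ ["</div>"]) [])
        ["<span class=\"leaf\">Leaf d=0</span>"])
      = pvMakeTree (n : Int) b := by
  induction n with
  | zero =>
    have h0 : PySem.List.pyRange 1 (((0 : Nat) : Int) + 1) 1 = ([] : List Int) :=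
      PySem.List.pyRange_one_eq_nil (by norm_num)
    rw [h0]
    simp [pvJoinE_singleton, pvMakeTree_zero]
  | succ m ih =>
    have hsplit : PySem.List.pyRange 1 (((m + 1 : Nat) : Int) + 1) 1
        = PySem.List.pyRange 1 ((m : Int) + 1) 1 ++ [((m : Int) + 1)] := by
      have h1 : (((m + 1 : Nat) : Int) + 1) = ((m : Int) + 1) + 1 := by push_cast; ring
      rw [h1]
      exact PySem.List.pyRange_one_succ_right (by omega)
    rw [hsplit, List.foldl_append]
    simp only [List.foldl_cons, List.foldl_nil]
    rw [pvLevel, ih]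
    push_cast
    rw [pvMakeTree_pos ((m : Int) + 1) b (by omega)]
    have h2 : ((m : Int) + 1 - 1) = (m : Int) := by ring
    rw [h2]

theorem gen_page_deep_nesting_eq (depth breadth : Int) :
    gen_page_deep_nesting depth breadth = gen_page_deep_nesting_alt depth breadth := by
  unfold gen_page_deep_nesting gen_page_deep_nesting_alt
  dsimp only
  rw [pvJoinE_cons, pvJoinE_append, pvJoinE_singleton]
  by_cases h : min depth 10 ≤ 0
  · rw [if_pos h, pvJoinE_singleton, pvMakeTree, if_pos h]
    simp [String.append_assoc]
  · rw [if_neg h]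
    obtain ⟨n, hn'⟩ : ∃ n : Nat, min depth 10 = ((n : Int) + 1) :=
      ⟨(min depth 10 - 1).toNat, by omega⟩
    rw [hn']
    have hfold := pvOuter (min breadth 3) (n + 1)
    push_cast at hfold
    rw [hfold]
    simp [String.append_assoc]

-- ===== VERDICT (by name: the statement is the Claim_ definition above) =====
theorem gen_page_deep_nesting_spec : Claim_equal_gen_page_deep_nesting := by
  intro depth breadth _
  unfold Spec_gen_page_deep_nesting
  exact gen_page_deep_nesting_eq depth breadth
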